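-- pv_equiv track=rewrite | github.com/5H4/pxiel | no_tf/nutela.py | nuty
-- ===== SOURCE A (Python) =====
-- def nuty(text = ''):
--     # Did you love nutella ?
--     nutela = [[1,'A'],[2,'B'],[3,'C'],[4,'D'],
--               [5,'E'],[6,'F'],[7,'G'],[8,'H'],
--               [9,'I'],[10,'J'],[11,'K'],[12,'L'],
--               [13,'M'],[14,'N'],[15,'O'],[16,'P'],
--               [17,'Q'],[18,'R'],[19,'S'],[20,'T'],
--               [21,'U'],[22,'V'],[23,'W'],[24,'X'],
--               [25,'Y'],[26,'Z']
--             ]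
--     # Yes i love but only with milk :/
--     milk = []
--     for char in text:
--         for num in nutela:
--             if num[1] == char:
--                 milk.append(num[0])
--     # Ok, then return me nutelak with milk . Thanks.
--     return milk
-- ===== SOURCE B (Python) =====
-- def nuty(text=''):
--     milk = []
--     for char in text:
--         if 'A' <= char <= 'Z':
--             milk.append(ord(char) - 64)
--     return milk
-- ===== Notes on version B (the rewrite author's own statement) =====
-- stated objective: simpler
-- what changed: Replaces the 26-entry lookup table and its inner scan with a direct range test and arithmetic on the character code (ord(char)-64).
import Mathlib
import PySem

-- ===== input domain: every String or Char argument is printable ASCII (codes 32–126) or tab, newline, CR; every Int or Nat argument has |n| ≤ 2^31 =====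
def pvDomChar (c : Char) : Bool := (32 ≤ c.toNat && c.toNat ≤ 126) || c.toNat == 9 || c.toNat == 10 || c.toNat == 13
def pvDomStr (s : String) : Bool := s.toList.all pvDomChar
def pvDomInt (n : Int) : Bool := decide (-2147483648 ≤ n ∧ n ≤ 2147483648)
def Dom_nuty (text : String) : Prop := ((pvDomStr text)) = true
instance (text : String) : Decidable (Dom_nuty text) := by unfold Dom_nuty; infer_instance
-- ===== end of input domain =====

-- B replaces A's 26-entry lookup table and its inner scan with a range test and arithmetic on the character code.

-- ===== PORT A =====
-- the literal nutela table from A (pairs (number, letter))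
def nutela : List (Int × Char) :=
  [(1,'A'),(2,'B'),(3,'C'),(4,'D'),(5,'E'),(6,'F'),(7,'G'),(8,'H'),
   (9,'I'),(10,'J'),(11,'K'),(12,'L'),(13,'M'),(14,'N'),(15,'O'),(16,'P'),
   (17,'Q'),(18,'R'),(19,'S'),(20,'T'),(21,'U'),(22,'V'),(23,'W'),(24,'X'),
   (25,'Y'),(26,'Z')]

def nuty (text : String) : List Int :=
  text.toList.foldl (fun milk char =>
    nutela.foldl (fun m num => if num.2 == char then m ++ [num.1] else m) milk) []

-- ===== PORT B =====
def nuty_alt (text : String) : List Int :=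
  text.toList.filterMap (fun c =>
    if 'A' ≤ c ∧ c ≤ 'Z' then some ((c.toNat : Int) - 64) else none)

-- ===== PRECONDITION & SPEC =====
def Spec_nuty (text : String) (out : List Int) : Prop := out = nuty_alt text
instance (text : String) (out : List Int) : Decidable (Spec_nuty text out) := by unfold Spec_nuty; infer_instance

-- ===== CLAIM (what is proved, stated in full; the proofs are below) =====
def Claim_equal_nuty : Prop := ∀ (text : String), Dom_nuty text → Spec_nuty text (nuty text)

-- ===== LEMMAS AND PROOFS =====

lemma char_le_iff (c d : Char) : c ≤ d ↔ c.toNat ≤ d.toNat := by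
  simp [Char.le_def, UInt32.le_iff_toNat_le]

-- the filtered table yields exactly B's per-character contribution
lemma nutela_filter (c : Char) :
    (nutela.filter (fun num => num.2 == c)).map Prod.fst
      = (if 'A' ≤ c ∧ c ≤ 'Z' then some ((c.toNat : Int) - 64) else none).toList := by
  by_cases h : 'A' ≤ c ∧ c ≤ 'Z'
  · obtain ⟨h1, h2⟩ := h
    rw [char_le_iff] at h1 h2
    have hA : 'A'.toNat = 65 := rfl
    have hZ : 'Z'.toNat = 90 := rfl
    rw [hA] at h1; rw [hZ] at h2
    obtain ⟨n, hn, h65, h90⟩ : ∃ n, c = Char.ofNat n ∧ 65 ≤ n ∧ n ≤ 90 :=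
      ⟨c.toNat, (Char.ofNat_toNat c).symm, h1, h2⟩
    subst hn
    interval_cases n <;> decide
  · rw [if_neg h]
    have hmem : ∀ num ∈ nutela, 65 ≤ (Prod.snd num).toNat ∧ (Prod.snd num).toNat ≤ 90 := by decide
    have hfilter : nutela.filter (fun num => num.2 == c) = [] := by
      rw [List.filter_eq_nil_iff]
      intro num hn
      simp only [beq_iff_eq]
      intro hEq
      apply h
      have hb := hmem num hn
      rw [← hEq]
      exact ⟨(char_le_iff _ _).mpr hb.1, (char_le_iff _ _).mpr hb.2⟩
    rw [hfilter]
    rfl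

lemma nuty_outer (l : List Char) (m : List Int) :
    l.foldl (fun milk char =>
        nutela.foldl (fun m num => if num.2 == char then m ++ [num.1] else m) milk) m
      = m ++ l.filterMap (fun c =>
          if 'A' ≤ c ∧ c ≤ 'Z' then some ((c.toNat : Int) - 64) else none) := by
  induction l generalizing m with
  | nil => simp
  | cons c tl ih =>
      rw [List.foldl_cons, List.filterMap_cons, ih,
        PySem.List.foldl_append_if (fun num => num.2 == c) Prod.fst, nutela_filter c]
      cases hc : (if 'A' ≤ c ∧ c ≤ 'Z' then some ((c.toNat : Int) - 64) else none) <;>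
        simp

-- ===== VERDICT (by name: the statement is the Claim_ definition above) =====
theorem nuty_spec : Claim_equal_nuty := by
  intro text _
  unfold Spec_nuty nuty nuty_alt
  simpa using nuty_outer text.toList []
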